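-- pv_equiv track=rewrite | github.com/Srini-py/Python | Daily_Coding_Problem/12_staircase.py | variableFibonacci
-- ===== SOURCE A (Python) =====
-- def variableFibonacci(n, m):
--     res = [0] * (n + 1)
--     res[0] = 0
--     res[1] = 1
--     for i in range(2, n + 1):
--         j = 1
--         while j <= m and j <= i:
--             res[i] += res[i - j]
--             j += 1
--     return res[n]
-- ===== SOURCE B (Python) =====
-- def variableFibonacci(n, m):
--     res = [0, 1]
--     w = max(m, 0)
--     window = 1 if w >= 1 else 0
--     for i in range(2, n + 1):
--         res.append(window)
--         window += res[i]
--         if i - w >= 0: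
--             window -= res[i - w]
--     return res[n]
-- ===== Notes on version B (the rewrite author's own statement) =====
-- stated objective: faster
-- what changed: Replaces the O(n*m) inner while-loop that re-sums the previous min(m,i) terms at every index by a sliding-window running sum that is updated in O(1) per index (add the new term, drop the term that leaves the window).
import Mathlib
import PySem

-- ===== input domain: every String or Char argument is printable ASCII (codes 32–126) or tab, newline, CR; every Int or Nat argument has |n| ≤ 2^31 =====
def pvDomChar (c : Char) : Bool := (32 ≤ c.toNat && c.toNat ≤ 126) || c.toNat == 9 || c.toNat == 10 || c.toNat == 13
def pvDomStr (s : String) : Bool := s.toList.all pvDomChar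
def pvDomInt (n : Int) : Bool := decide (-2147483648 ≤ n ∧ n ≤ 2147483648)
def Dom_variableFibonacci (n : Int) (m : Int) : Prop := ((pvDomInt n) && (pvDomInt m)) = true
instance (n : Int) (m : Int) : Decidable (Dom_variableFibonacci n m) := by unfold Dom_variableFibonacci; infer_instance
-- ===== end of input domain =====

-- B replaces A's O(n*m) inner re-summation loop by an O(n) sliding-window running sum; equal results proved for all n ≥ 1.

-- ===== PORT A =====
-- the inner 'while j <= m and j <= i' loop of A; fuel bounds the iteration count (j ≤ i stops it after at most i steps)
def vfibWhileA (res : List Int) (i : Int) (j : Int) (m : Int) (fuel : Nat) : List Int :=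
  match fuel with
  | 0 => res
  | f + 1 =>
    if j ≤ m ∧ j ≤ i then
      vfibWhileA (PySem.List.pySetD res i (PySem.List.pyGetD res i 0 + PySem.List.pyGetD res (i - j) 0))
        i (j + 1) m f
    else res

def variableFibonacci (n : Int) (m : Int) : Int :=
  let res := List.replicate (n + 1).toNat (0 : Int)
  let res := PySem.List.pySetD res 0 0
  let res := PySem.List.pySetD res 1 1
  let res := (PySem.List.pyRange 2 (n + 1) 1).foldl (fun res i => vfibWhileA res i 1 m (i.toNat + 1)) res
  PySem.List.pyGetD res n 0

-- ===== PORT B =====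
def variableFibonacci_alt (n : Int) (m : Int) : Int :=
  let w := max m 0
  let st := (PySem.List.pyRange 2 (n + 1) 1).foldl
    (fun st i =>
      let res := st.1 ++ [st.2]
      let window := st.2 + PySem.List.pyGetD res i 0
      let window := if 0 ≤ i - w then window - PySem.List.pyGetD res (i - w) 0 else window
      (res, window))
    (([0, 1] : List Int), if (1 : Int) ≤ w then (1 : Int) else 0)
  PySem.List.pyGetD st.1 n 0

-- ===== PRECONDITION & SPEC =====
-- A writes res[0] and res[1] into a list of length n+1, so it raises IndexError for every n ≤ 0.
def Pre_variableFibonacci (n : Int) (m : Int) : Prop := 1 ≤ n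
instance (n : Int) (m : Int) : Decidable (Pre_variableFibonacci n m) := by unfold Pre_variableFibonacci; infer_instance
def pvWitness_variableFibonacci : Int × Int := (3, 2)

def Spec_variableFibonacci (n : Int) (m : Int) (out : Int) : Prop := out = variableFibonacci_alt n m
instance (n : Int) (m : Int) (out : Int) : Decidable (Spec_variableFibonacci n m out) := by unfold Spec_variableFibonacci; infer_instance

-- ===== CLAIM (what is proved, stated in full; the proofs are below) =====
def Claim_equal_variableFibonacci : Prop := ∀ (n : Int) (m : Int), Dom_variableFibonacci n m → Pre_variableFibonacci n m → Spec_variableFibonacci n m (variableFibonacci n m)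
-- ===== LEMMAS AND PROOFS =====

def vfK (m : Int) (i : Nat) : Nat := min m.toNat i

def vg (m : Int) : Nat → Int
  | 0 => 0
  | 1 => 1
  | (i + 2) => ((List.range' 1 (vfK m (i + 2))).attach.map (fun jv => vg m (i + 2 - jv.1))).sum
decreasing_by
  obtain ⟨t, ht, he⟩ := List.mem_range'.1 jv.2
  omega

def vGsum (m : Int) (a : Nat) (c : Nat) : Int :=
  ((List.range' 1 c).map (fun jv => vg m (a - jv))).sum

lemma vg_eq (m : Int) (i : Nat) :
    vg m (i + 2) = vGsum m (i + 2) (vfK m (i + 2)) := by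
  rw [vg, vGsum]
  simp

lemma range'_map_shift (m : Int) (a : Nat) : ∀ (c s : Nat),
    (List.range' (s + 1) c).map (fun jv => vg m (a + 1 - jv)) = (List.range' s c).map (fun jv => vg m (a - jv)) := by
  intro c
  induction c with
  | zero => intro s; simp
  | succ c ih =>
    intro s
    rw [List.range'_succ, List.range'_succ]
    simp only [List.map_cons, ih (s + 1)]
    congr 2
    omega

lemma vGsum_shift (m : Int) (a c : Nat) :
    vGsum m (a + 1) (c + 1) = vg m a + vGsum m a c := by
  unfold vGsum
  rw [List.range'_succ]
  simp only [List.map_cons, List.sum_cons, Nat.add_sub_cancel]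
  rw [range'_map_shift m a c 1]

lemma vGsum_concat (m : Int) (a c : Nat) :
    vGsum m a (c + 1) = vGsum m a c + vg m (a - (c + 1)) := by
  unfold vGsum
  rw [List.range'_concat]
  simp only [List.map_append, List.sum_append, List.map_cons, List.map_nil, List.sum_cons,
    List.sum_nil]
  rw [show (1 + 1 * c) = c + 1 from by omega]
  ring

lemma vg_zero_width (m : Int) (a : Nat) (h2 : 2 ≤ a) (hm : m.toNat = 0) : vg m a = 0 := by
  obtain ⟨b, rfl⟩ : ∃ b, a = b + 2 := ⟨a - 2, by omega⟩
  rw [vg_eq]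
  simp [vfK, hm, vGsum]

lemma vg_recur (m : Int) (a : Nat) (h2 : 2 ≤ a) :
    vg m (a + 1) = vg m a + vg m a - (if m.toNat ≤ a then vg m (a - m.toNat) else 0) := by
  obtain ⟨b, rfl⟩ : ∃ b, a = b + 2 := ⟨a - 2, by omega⟩
  set a := b + 2 with ha
  rcases Nat.eq_zero_or_pos m.toNat with hm | hm
  · rw [if_pos (by omega)]
    have h1 : vg m a = 0 := vg_zero_width m a (by omega) hm
    have h3 : vg m (a + 1) = 0 := vg_zero_width m (a + 1) (by omega) hm
    rw [h1, h3, hm]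
    simp [h1]
  · by_cases hle : m.toNat ≤ a
    · rw [if_pos hle]
      have e1 : vg m (a + 1) = vGsum m (a + 1) m.toNat := by
        have h := vg_eq m (b + 1)
        rw [show b + 1 + 2 = a + 1 from rfl] at h
        rw [h]
        congr 1
        simp [vfK]; omega
      have e2 : vg m a = vGsum m a m.toNat := by
        rw [vg_eq m b]
        congr 1
        simp [vfK]; omega
      obtain ⟨K1, hK1⟩ : ∃ K1, m.toNat = K1 + 1 := ⟨m.toNat - 1, by omega⟩
      rw [hK1] at e2
      rw [vGsum_concat] at e2
      rw [show a - (K1 + 1) = a - m.toNat from by omega] at e2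
      rw [e1, hK1, vGsum_shift, ← hK1]
      linarith
    · rw [if_neg hle]
      have e1 : vg m (a + 1) = vGsum m (a + 1) (a + 1) := by
        have h := vg_eq m (b + 1)
        rw [show b + 1 + 2 = a + 1 from rfl] at h
        rw [h]
        congr 1
        simp [vfK]; omega
      have e2 : vg m a = vGsum m a a := by
        rw [vg_eq m b]
        congr 1
        simp [vfK]; omega
      rw [e1, vGsum_shift]
      linarith
lemma vg_two (m : Int) : vg m 2 = if (1 : Int) ≤ max m 0 then 1 else 0 := by
  rw [vg_eq m 0]
  rcases h : m.toNat with _ | _ | k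
  · rw [if_neg (by omega)]
    simp [vfK, h, vGsum]
  · rw [if_pos (by omega)]
    simp [vfK, h, vGsum, List.range'_succ, vg]
  · rw [if_pos (by omega)]
    have hk : vfK m 2 = 2 := by simp [vfK]; omega
    simp [hk, vGsum, List.range'_succ, vg]

lemma whileA_eq (m : Int) (i : Nat) (p : List Int) (hp : p.length = i) :
    ∀ (fuel : Nat) (j : Nat) (acc : Int) (suf : List Int), 1 ≤ j → i < j + fuel →
    vfibWhileA (p ++ acc :: suf) (i : Int) (j : Int) m fuel
      = p ++ (acc + ((List.range' j (vfK m i + 1 - j)).map (fun jv => p.getD (i - jv) 0)).sum) :: suf := by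
  intro fuel
  induction fuel with
  | zero =>
    intro j acc suf hj hlt
    have hc : vfK m i + 1 - j = 0 := by unfold vfK; omega
    rw [vfibWhileA, hc]
    simp
  | succ f ih =>
    intro j acc suf hj hlt
    rw [vfibWhileA]
    have hgetAt : (p ++ acc :: suf).getD i 0 = acc := by rw [← hp]; simp
    by_cases hc : j ≤ vfK m i
    · have hc' : j ≤ min m.toNat i := hc
      rw [if_pos (by constructor <;> omega)]
      have hij : (i : Int) - (j : Int) = ((i - j : Nat) : Int) := by omega
      have hlt2 : i - j < p.length := by omega
      have hgetLt : (p ++ acc :: suf).getD (i - j) 0 = p.getD (i - j) 0 := by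
        simp [List.getD_eq_getElem?_getD, List.getElem?_append_left hlt2]
      have hset : (p ++ acc :: suf).set i (acc + p.getD (i - j) 0) = p ++ (acc + p.getD (i - j) 0) :: suf := by
        rw [← hp]; simp
      rw [hij]
      simp only [PySem.List.pyGetD_natCast, PySem.List.pySetD_natCast]
      rw [hgetAt, hgetLt, hset]
      have hj1 : ((j : Int) + 1) = ((j + 1 : Nat) : Int) := by omega
      rw [hj1, ih (j + 1) (acc + p.getD (i - j) 0) suf (by omega) (by omega)]
      congr 2
      rw [show vfK m i + 1 - j = (vfK m i - j) + 1 from by unfold vfK; omega,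
        List.range'_succ]
      simp only [List.map_cons, List.sum_cons]
      rw [show vfK m i - j = vfK m i + 1 - (j + 1) from by omega]
      ring
    · have hc' : ¬ j ≤ min m.toNat i := hc
      rw [if_neg (by omega)]
      have hz : vfK m i + 1 - j = 0 := by unfold vfK; omega
      rw [hz]
      simp

lemma whileA_eq1 (m : Int) (i : Nat) (p : List Int) (hp : p.length = i) (fuel : Nat)
    (acc : Int) (suf : List Int) (h : i < 1 + fuel) :
    vfibWhileA (p ++ acc :: suf) (i : Int) 1 m fuel
      = p ++ (acc + ((List.range' 1 (vfK m i)).map (fun jv => p.getD (i - jv) 0)).sum) :: suf := by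
  have h2 := whileA_eq m i p hp fuel 1 acc suf (le_refl 1) h
  simpa using h2

lemma sumP_eq_vg (m : Int) (a : Nat) (h2 : 2 ≤ a) :
    ((List.range' 1 (vfK m a)).map (fun jv => ((List.range a).map (vg m)).getD (a - jv) 0)).sum = vg m a := by
  obtain ⟨c, rfl⟩ : ∃ c, a = c + 2 := ⟨a - 2, by omega⟩
  rw [vg_eq m c]
  unfold vGsum
  congr 1
  apply List.map_congr_left
  intro jv hjv
  obtain ⟨t, ht, rfl⟩ := List.mem_range'.1 hjv
  exact PySem.List.getD_map_range (vg m) (c + 2) (c + 2 - (1 + 1 * t)) 0 (by omega)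

lemma foldA_eq (m : Int) (b : Nat) :
    ∀ (k a : Nat), 2 ≤ a → a + k = b →
    (PySem.List.pyRange (a : Int) (b : Int) 1).foldl
        (fun res i => vfibWhileA res i 1 m (i.toNat + 1))
        ((List.range a).map (vg m) ++ List.replicate (b - a) 0)
      = (List.range b).map (vg m) := by
  intro k
  induction k with
  | zero =>
    intro a h2 hab
    have hab' : a = b := by omega
    subst hab'
    simp
  | succ k ih =>
    intro a h2 hab
    have hlt : (a : Int) < (b : Int) := by omega
    rw [PySem.List.pyRange_one_cons hlt, List.foldl_cons]
    have hrep : List.replicate (b - a) (0 : Int) = 0 :: List.replicate (b - (a + 1)) 0 := by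
      rw [show b - a = (b - (a + 1)) + 1 from by omega, List.replicate_succ]
    rw [hrep]
    have hP : ((List.range a).map (vg m)).length = a := by simp
    have htn : ((a : Int)).toNat = a := Int.toNat_natCast a
    rw [htn, whileA_eq1 m a ((List.range a).map (vg m)) hP (a + 1) 0 (List.replicate (b - (a + 1)) 0) (by omega)]
    rw [zero_add, sumP_eq_vg m a h2]
    have hcomb : (List.range a).map (vg m) ++ vg m a :: List.replicate (b - (a + 1)) 0
        = (List.range (a + 1)).map (vg m) ++ List.replicate (b - (a + 1)) 0 := by
      rw [List.range_succ, List.map_append, List.append_assoc]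
      rfl
    rw [hcomb]
    have hcast : ((a : Int) + 1) = (((a + 1 : Nat)) : Int) := by omega
    rw [hcast]
    exact ih (a + 1) (by omega) (by omega)

lemma foldB_eq (m : Int) (b : Nat) :
    ∀ (k a : Nat), 2 ≤ a → a + k = b →
    (PySem.List.pyRange (a : Int) (b : Int) 1).foldl
        (fun st i =>
          let res := st.1 ++ [st.2]
          let window := st.2 + PySem.List.pyGetD res i 0
          let window := if 0 ≤ i - max m 0 then window - PySem.List.pyGetD res (i - max m 0) 0 else window
          (res, window))
        ((List.range a).map (vg m), vg m a)
      = ((List.range b).map (vg m), vg m b) := by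
  intro k
  induction k with
  | zero =>
    intro a h2 hab
    have hab' : a = b := by omega
    subst hab'
    simp
  | succ k ih =>
    intro a h2 hab
    have hlt : (a : Int) < (b : Int) := by omega
    rw [PySem.List.pyRange_one_cons hlt, List.foldl_cons]
    have hres : (List.range a).map (vg m) ++ [vg m a] = (List.range (a + 1)).map (vg m) := by
      rw [List.range_succ, List.map_append]
      rfl
    simp only [hres]
    have hget1 : PySem.List.pyGetD ((List.range (a + 1)).map (vg m)) (a : Int) 0 = vg m a := by
      rw [PySem.List.pyGetD_natCast]
      exact PySem.List.getD_map_range (vg m) (a + 1) a 0 (by omega)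
    rw [hget1]
    have hwin : (if 0 ≤ (a : Int) - max m 0 then
          vg m a + vg m a - PySem.List.pyGetD ((List.range (a + 1)).map (vg m)) ((a : Int) - max m 0) 0
        else vg m a + vg m a) = vg m (a + 1) := by
      by_cases hle : m.toNat ≤ a
      · rw [if_pos (by omega)]
        rw [show (a : Int) - max m 0 = ((a - m.toNat : Nat) : Int) from by omega]
        rw [PySem.List.pyGetD_natCast]
        rw [PySem.List.getD_map_range (vg m) (a + 1) (a - m.toNat) 0 (by omega)]
        rw [vg_recur m a h2, if_pos hle]
      · rw [if_neg (by omega)]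
        rw [vg_recur m a h2, if_neg hle]
        ring
    rw [hwin]
    have hcast : ((a : Int) + 1) = (((a + 1 : Nat)) : Int) := by omega
    rw [hcast]
    exact ih (a + 1) (by omega) (by omega)

lemma portA_eq (n m : Int) (h : 1 ≤ n) : variableFibonacci n m = vg m n.toNat := by
  obtain ⟨N, rfl⟩ : ∃ N : Nat, n = (N : Int) := ⟨n.toNat, by omega⟩
  have hN : 1 ≤ N := by omega
  simp only [variableFibonacci]
  rw [show ((N : Int) + 1).toNat = N + 1 from by omega]
  rw [show List.replicate (N + 1) (0 : Int) = 0 :: 0 :: List.replicate (N - 1) 0 from by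
    rw [show N + 1 = (N - 1) + 1 + 1 from by omega, List.replicate_succ, List.replicate_succ]]
  have hsets : ∀ r : List Int, PySem.List.pySetD (PySem.List.pySetD (0 :: 0 :: r) 0 0) 1 1 = 0 :: 1 :: r := by
    intro r
    simp [PySem.List.pySetD_of_nonneg]
  rw [hsets]
  rw [show (0 :: 1 :: List.replicate (N - 1) (0 : Int)) = (List.range 2).map (vg m) ++ List.replicate ((N + 1) - 2) 0 from by
    simp [List.range_succ, vg]]
  rw [show (2 : Int) = ((2 : Nat) : Int) from by norm_num,
    show ((N : Int) + 1) = (((N + 1 : Nat)) : Int) from by push_cast; ring]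
  rw [foldA_eq m (N + 1) (N - 1) 2 (by omega) (by omega)]
  rw [PySem.List.pyGetD_natCast, PySem.List.getD_map_range (vg m) (N + 1) N 0 (by omega)]
  rw [Int.toNat_natCast]

lemma portB_eq (n m : Int) (h : 1 ≤ n) : variableFibonacci_alt n m = vg m n.toNat := by
  obtain ⟨N, rfl⟩ : ∃ N : Nat, n = (N : Int) := ⟨n.toNat, by omega⟩
  have hN : 1 ≤ N := by omega
  simp only [variableFibonacci_alt]
  rw [show (([0, 1] : List Int), if (1 : Int) ≤ max m 0 then (1 : Int) else 0)
      = (((List.range 2).map (vg m)), vg m 2) from by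
    rw [← vg_two m]
    simp [List.range_succ, vg]]
  rw [show (2 : Int) = ((2 : Nat) : Int) from by norm_num,
    show ((N : Int) + 1) = (((N + 1 : Nat)) : Int) from by push_cast; ring]
  rw [foldB_eq m (N + 1) (N - 1) 2 (by omega) (by omega)]
  rw [PySem.List.pyGetD_natCast, PySem.List.getD_map_range (vg m) (N + 1) N 0 (by omega)]
  rw [Int.toNat_natCast]

-- ===== VERDICT (by name: the statement is the Claim_ definition above) =====
theorem variableFibonacci_spec : Claim_equal_variableFibonacci := by
  intro n m _ hpre
  unfold Spec_variableFibonacci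
  rw [portA_eq n m hpre, portB_eq n m hpre]
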